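-- pv_equiv track=rewrite | github.com/EarthSciML/EarthSciSerialization | packages/earthsci_toolkit/src/earthsci_toolkit/data_loaders/points.py | _records_to_columns
-- ===== SOURCE A (Python) =====
-- from typing import Any, Callable, Dict, Iterable, List, Mapping, Optional, Union
--
-- def _records_to_columns(records: Iterable[Mapping[str, Any]]) -> Dict[str, List[Any]]:
--     columns: Dict[str, List[Any]] = {}
--     record_list = list(records)
--     for record in record_list:
--         for key in record.keys():
--             if key not in columns:
--                 columns[key] = [None] * len(record_list)
--     for idx, record in enumerate(record_list):
--         for key, value in record.items():
--             columns[key][idx] = value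
--     return columns
-- ===== SOURCE B (Python) =====
-- def _records_to_columns(records):
--     record_list = list(records)
--     keys = dict.fromkeys(key for record in record_list for key in record)
--     return {key: [record.get(key) for record in record_list] for key in keys}
-- ===== Notes on version B (the rewrite author's own statement) =====
-- stated objective: simpler
-- what changed: A preallocates every column as [None]*n and then scatters values record-by-record into columns[key][idx]; B collects the distinct keys once with dict.fromkeys and builds each column in one column-major gather [record.get(key) for record in records], with no preallocation or index assignment.
import Mathlib
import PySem

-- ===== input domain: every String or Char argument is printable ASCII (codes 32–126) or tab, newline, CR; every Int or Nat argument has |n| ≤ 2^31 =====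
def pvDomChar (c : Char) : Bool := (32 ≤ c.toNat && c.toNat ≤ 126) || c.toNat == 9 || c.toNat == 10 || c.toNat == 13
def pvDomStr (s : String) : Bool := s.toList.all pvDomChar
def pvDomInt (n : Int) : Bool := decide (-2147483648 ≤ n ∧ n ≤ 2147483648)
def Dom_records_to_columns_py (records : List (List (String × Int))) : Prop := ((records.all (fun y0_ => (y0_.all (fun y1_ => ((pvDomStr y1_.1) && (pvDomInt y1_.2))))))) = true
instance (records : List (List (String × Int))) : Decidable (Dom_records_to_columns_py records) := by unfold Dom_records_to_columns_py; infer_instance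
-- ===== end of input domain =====

-- B replaces A's preallocate-then-scatter (columns of None overwritten index by index)
-- by a column-major gather: dedup the keys once, then one map per key over the records
-- (objective: simpler decomposition, same asymptotic cost).

-- ===== PORT A =====
-- A: preallocate each column as [None]*n on first sight of its key, then
-- enumerate the records and overwrite columns[key][idx] for every item.
def records_to_columns_py (records : List (List (String × Int))) : List (String × List (Option Int)) :=
  let recordList := records
  let cols1 : PySem.Dict String (List (Option Int)) :=
    recordList.foldl
      (fun cols record =>
        ((PySem.Dict.ofList record).keys).foldl
          (fun cols key =>
            if cols.contains key then cols
            else cols.insert key (List.replicate recordList.length (none : Option Int)))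
          cols)
      PySem.Dict.empty
  let cols2 : PySem.Dict String (List (Option Int)) :=
    (PySem.List.enumerate recordList).foldl
      (fun cols p =>
        ((PySem.Dict.ofList p.2).items).foldl
          (fun cols kv => cols.modify kv.1 [] (fun l => PySem.List.pySetD l p.1 (some kv.2)))
          cols)
      cols1
  cols2.items

-- ===== PORT B =====
-- B: keys = dict.fromkeys(nested key generator) → PySem.List.dedup of the flattened keys;
-- result = {key: [record.get(key) for record in records] for key in keys}.
def records_to_columns_py_alt (records : List (List (String × Int))) : List (String × List (Option Int)) :=
  let recordList := records
  let keys := PySem.List.dedup (recordList.flatMap (fun record => (PySem.Dict.ofList record).keys))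
  keys.map (fun key => (key, recordList.map (fun record => (PySem.Dict.ofList record).get? key)))

-- ===== PRECONDITION & SPEC =====
def Spec_records_to_columns_py (records : List (List (String × Int))) (out : List (String × List (Option Int))) : Prop := out = records_to_columns_py_alt records
instance (records : List (List (String × Int))) (out : List (String × List (Option Int))) : Decidable (Spec_records_to_columns_py records out) := by unfold Spec_records_to_columns_py; infer_instance

-- ===== CLAIM (what is proved, stated in full; the proofs are below) =====
def Claim_equal_records_to_columns_py : Prop := ∀ (records : List (List (String × Int))), Dom_records_to_columns_py records → Spec_records_to_columns_py records (records_to_columns_py records)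

-- ===== LEMMAS AND PROOFS =====

-- Phase 1 of A ("if key not in columns: columns[key] = [None]*n") over a flat key list,
-- starting from a dict whose items are m paired with the constant column c.
theorem pv_phase1 (c : List (Option Int)) (ks m : List String) (hm : m.Nodup) :
    ks.foldl
      (fun cols key => if cols.contains key then cols else cols.insert key c)
      (PySem.Dict.mk (m.map (fun k => (k, c))))
    = PySem.Dict.mk ((PySem.Set.update m ks).map (fun k => (k, c))) := by
  induction ks generalizing m with
  | nil => simp [PySem.Set.update_nil]
  | cons k ks ih =>
    have hc : (PySem.Dict.mk (m.map (fun k => (k, c)))).contains k = decide (k ∈ m) := by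
      rw [PySem.Dict.contains_eq_decide_mem_keys]
      simp [PySem.Dict.keys_mk]
    rw [List.foldl_cons, PySem.Set.update_cons]
    by_cases h : k ∈ m
    · have hadd : PySem.Set.add m k = m := by
        simp [PySem.Set.add, h]
      rw [hadd]
      simpa [hc, h] using ih m hm
    · have hadd : PySem.Set.add m k = m ++ [k] := by
        simp [PySem.Set.add, h]
      have hnc : (PySem.Dict.mk (m.map (fun k => (k, c)))).contains k = false := by
        simp [hc, h]
      have hins := PySem.Dict.items_insert_of_not_contains (PySem.Dict.mk (m.map (fun k => (k, c)))) c hnc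
      have : (PySem.Dict.mk (m.map (fun k => (k, c)))).insert k c
          = PySem.Dict.mk ((m ++ [k]).map (fun k => (k, c))) := by
        apply PySem.Dict.ext; simp [hins]
      rw [hadd]
      simpa [hc, h, this] using ih (m ++ [k]) (by simp [List.nodup_append, hm]; exact fun a ha he => h (he ▸ ha))

theorem pv_phase2_record (K : List String) (hK : K.Nodup) (idx : Int)
    (ps : List (String × Int)) :
    ∀ (g : String → List (Option Int)),
    (ps.map Prod.fst).Nodup → (∀ p ∈ ps, p.1 ∈ K) →
    ps.foldl
      (fun cols kv => cols.modify kv.1 [] (fun l => PySem.List.pySetD l idx (some kv.2)))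
      (PySem.Dict.mk (K.map (fun k => (k, g k))))
    = PySem.Dict.mk (K.map (fun k => (k,
        match (PySem.Dict.mk ps).get? k with
        | some v => PySem.List.pySetD (g k) idx (some v)
        | none => g k))) := by
  induction ps with
  | nil =>
    intro g _ _
    simp [PySem.Dict.get?]
  | cons kv ps ih =>
    intro g hnd hsub
    obtain ⟨k0, v⟩ := kv
    have hk0K : k0 ∈ K := hsub (k0, v) (by simp)
    have hkeys : (PySem.Dict.mk (K.map (fun k => (k, g k)))).keys = K := by
      rw [PySem.Dict.keys_mk, List.map_map]; simp [Function.comp_def]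
    have hmem : (k0, g k0) ∈ (PySem.Dict.mk (K.map (fun k => (k, g k)))).items :=
      List.mem_map.mpr ⟨k0, hk0K, rfl⟩
    have hgetD : (PySem.Dict.mk (K.map (fun k => (k, g k)))).getD k0 [] = g k0 :=
      PySem.Dict.getD_of_mem_items _ hmem (by rw [hkeys]; exact hK) []
    have hcont : (PySem.Dict.mk (K.map (fun k => (k, g k)))).contains k0 = true := by
      rw [PySem.Dict.contains_eq_decide_mem_keys, hkeys]; simp [hk0K]
    have hstep : (PySem.Dict.mk (K.map (fun k => (k, g k)))).modify k0 []
          (fun l => PySem.List.pySetD l idx (some v))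
        = PySem.Dict.mk (K.map (fun k => (k,
            if k = k0 then PySem.List.pySetD (g k0) idx (some v) else g k))) := by
      unfold PySem.Dict.modify
      rw [hgetD]
      apply PySem.Dict.ext
      rw [PySem.Dict.items_insert_of_contains _ _ hcont]
      show (List.map (fun k => (k, g k)) K).map _ = _
      rw [List.map_map]
      apply List.map_congr_left
      intro k _
      by_cases hk : k = k0
      · subst hk; simp
      · simp [hk]
    rw [List.foldl_cons]
    show List.foldl _ ((PySem.Dict.mk (K.map (fun k => (k, g k)))).modify k0 []
          (fun l => PySem.List.pySetD l idx (some v))) ps = _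
    rw [hstep]
    rw [ih _ (by simpa using hnd.of_cons) (fun p hp => hsub p (List.mem_cons_of_mem _ hp))]
    apply PySem.Dict.ext
    show List.map _ K = List.map _ K
    apply List.map_congr_left
    intro k _
    have hk0ps : k0 ∉ ps.map Prod.fst := by
      have h2 := hnd
      rw [List.map_cons] at h2
      exact (List.nodup_cons.mp h2).1
    by_cases hk : k = k0
    · subst hk
      have : (PySem.Dict.mk ps).get? k = none := by
        unfold PySem.Dict.get?
        rw [List.find?_eq_none.mpr]
        · rfl
        · intro p hp
          simp only [beq_iff_eq]
          intro he
          exact hk0ps (List.mem_map.mpr ⟨p, hp, he⟩)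
      rw [PySem.Dict.get?_mk_cons]
      simp [this]
    · rw [PySem.Dict.get?_mk_cons]
      have : (k0 == k) = false := by simp [Ne.symm hk]
      rw [this]
      cases (PySem.Dict.mk ps).get? k <;> simp [hk]


theorem pv_phase2 (K : List String) (hK : K.Nodup)
    (rs : List (List (String × Int))) :
    ∀ (j : Nat) (pref : String → List (Option Int)),
    (∀ k, (pref k).length = j) →
    (∀ r ∈ rs, ∀ p ∈ (PySem.Dict.ofList r).items, p.1 ∈ K) →
    (PySem.List.enumerate rs (j : Int)).foldl
      (fun cols p =>
        ((PySem.Dict.ofList p.2).items).foldl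
          (fun cols kv => cols.modify kv.1 [] (fun l => PySem.List.pySetD l p.1 (some kv.2)))
          cols)
      (PySem.Dict.mk (K.map (fun k => (k, pref k ++ List.replicate rs.length (none : Option Int)))))
    = PySem.Dict.mk (K.map (fun k => (k, pref k ++ rs.map (fun r => (PySem.Dict.ofList r).get? k)))) := by
  induction rs with
  | nil =>
    intro j pref _ _
    simp [PySem.List.enumerate_nil]
  | cons r rs ih =>
    intro j pref hlen hsub
    rw [PySem.List.enumerate_cons, List.foldl_cons]
    have hrec := pv_phase2_record K hK (j : Int) (PySem.Dict.ofList r).items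
      (fun k => pref k ++ List.replicate (r :: rs).length (none : Option Int))
      (PySem.Dict.nodup_keys_ofList r)
      (fun p hp => hsub r (by simp) p hp)
    show List.foldl _
      (((PySem.Dict.ofList r).items).foldl
        (fun cols kv => cols.modify kv.1 [] (fun l => PySem.List.pySetD l (j : Int) (some kv.2)))
        (PySem.Dict.mk (K.map (fun k => (k, pref k ++ List.replicate (r :: rs).length (none : Option Int))))))
      (PySem.List.enumerate rs ((j : Int) + 1)) = _
    rw [hrec]
    have hmid : ∀ k : String,
        (match (PySem.Dict.mk (PySem.Dict.ofList r).items).get? k with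
          | some v => PySem.List.pySetD (pref k ++ List.replicate (r :: rs).length (none : Option Int)) (j : Int) (some v)
          | none => pref k ++ List.replicate (r :: rs).length (none : Option Int))
        = (pref k ++ [(PySem.Dict.ofList r).get? k]) ++ List.replicate rs.length (none : Option Int) := by
      intro k
      have heta : (PySem.Dict.mk (PySem.Dict.ofList r).items) = PySem.Dict.ofList r := rfl
      rw [heta]
      cases hg : (PySem.Dict.ofList r).get? k with
      | none =>
        simp [List.replicate_succ]
      | some v =>
        change PySem.List.pySetD (pref k ++ List.replicate (r :: rs).length (none : Option Int)) (j : Int) (some v) = _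
        rw [PySem.List.pySetD_natCast]
        rw [List.set_append]
        rw [if_neg (by simp [hlen k])]
        simp [hlen k, List.replicate_succ]
    have hcast : ((j : Int) + 1) = ((j + 1 : Nat) : Int) := by push_cast; ring
    calc List.foldl _ _ (PySem.List.enumerate rs ((j : Int) + 1))
        = List.foldl
            (fun cols p =>
              ((PySem.Dict.ofList p.2).items).foldl
                (fun cols kv => cols.modify kv.1 [] (fun l => PySem.List.pySetD l p.1 (some kv.2)))
                cols)
            (PySem.Dict.mk (K.map (fun k => (k, (pref k ++ [(PySem.Dict.ofList r).get? k]) ++ List.replicate rs.length (none : Option Int)))))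
            (PySem.List.enumerate rs ((j + 1 : Nat) : Int)) := by
          rw [← hcast]
          congr 1
          apply PySem.Dict.ext
          show List.map _ K = List.map _ K
          exact List.map_congr_left (fun k _ => by rw [hmid k])
      _ = PySem.Dict.mk (K.map (fun k => (k, pref k ++ (r :: rs).map (fun r => (PySem.Dict.ofList r).get? k)))) := by
          rw [ih (j + 1) (fun k => pref k ++ [(PySem.Dict.ofList r).get? k])
            (fun k => by simp [hlen k])
            (fun r' hr' => hsub r' (List.mem_cons_of_mem _ hr'))]
          congr 1
          apply List.map_congr_left
          intro k _
          simp

-- ===== VERDICT (by name: the statement is the Claim_ definition above) =====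
theorem records_to_columns_py_spec : Claim_equal_records_to_columns_py := by
  intro records _
  unfold Spec_records_to_columns_py records_to_columns_py records_to_columns_py_alt
  dsimp only
  have hKnodup : (PySem.List.dedup (records.flatMap (fun record => (PySem.Dict.ofList record).keys))).Nodup := by
    rw [PySem.List.dedup_eq_ofList]; exact PySem.Set.nodup_ofList _
  rw [← List.foldl_flatMap]
  have hempty : (PySem.Dict.empty : PySem.Dict String (List (Option Int)))
      = PySem.Dict.mk (([] : List String).map (fun k => (k, List.replicate records.length (none : Option Int)))) := rfl
  rw [hempty, pv_phase1 _ _ [] List.nodup_nil]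
  have hupd : PySem.Set.update ([] : List String) (records.flatMap (fun record => (PySem.Dict.ofList record).keys))
      = PySem.List.dedup (records.flatMap (fun record => (PySem.Dict.ofList record).keys)) := by
    rw [PySem.Set.update_nil_left, PySem.List.dedup_eq_ofList]
  rw [hupd]
  have hsub : ∀ r ∈ records, ∀ p ∈ (PySem.Dict.ofList r).items,
      p.1 ∈ PySem.List.dedup (records.flatMap (fun record => (PySem.Dict.ofList record).keys)) := by
    intro r hr p hp
    rw [PySem.List.dedup_eq_ofList, PySem.Set.mem_ofList]
    exact List.mem_flatMap.mpr ⟨r, hr, PySem.Dict.mem_keys_of_mem_items _ hp⟩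
  have h2 := pv_phase2 _ hKnodup records 0 (fun _ => []) (fun _ => rfl) hsub
  simp only [List.nil_append, Nat.cast_zero] at h2
  rw [h2]
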